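-- pv_equiv track=rewrite | github.com/stephenJohnGiardina/Advent_Of_Code | Day_4/day_4.py | check_cols
-- ===== SOURCE A (Python) =====
-- def check_cols(board):
--     for col_index in range(len(board)):
--         number_found = False
--         for row_index in range(len(board)):
--             if board[row_index][col_index] is not True:
--                 number_found = True
--         if not number_found:
--             return True
--     return False
-- ===== SOURCE B (Python) =====
-- def check_cols(board):
--     n = len(board)
--     counts = [0] * n
--     for row_index in range(n):
--         for col_index in range(n):
--             if board[row_index][col_index] is True:
--                 counts[col_index] += 1
--     return any(c == n for c in counts)
-- ===== Notes on version B (the rewrite author's own statement) =====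
-- stated objective: alternative
-- what changed: Replaces the column-outer scan with a boolean 'number_found' flag and early return by a single row-major pass that accumulates a per-column True-counter table and then checks whether any counter equals the board height.
-- outside the precondition, e.g. on check_cols([[True, False], [True]]): A returns True, B raises IndexError
import Mathlib
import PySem

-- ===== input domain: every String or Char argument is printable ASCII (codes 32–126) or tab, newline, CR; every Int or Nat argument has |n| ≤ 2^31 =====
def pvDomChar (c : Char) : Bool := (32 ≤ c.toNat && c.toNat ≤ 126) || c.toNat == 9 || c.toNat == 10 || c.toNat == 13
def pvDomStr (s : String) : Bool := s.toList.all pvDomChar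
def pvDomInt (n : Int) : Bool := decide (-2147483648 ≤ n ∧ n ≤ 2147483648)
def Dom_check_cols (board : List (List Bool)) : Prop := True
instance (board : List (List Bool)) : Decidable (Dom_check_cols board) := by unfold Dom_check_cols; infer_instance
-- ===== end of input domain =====

-- B replaces A's column-outer flag-and-early-return scan by one row-major pass building a
-- per-column True-counter table (objective: alternative decomposition, same asymptotic cost).

-- ===== PORT A =====
-- inner 'for row_index in range(len(board))' loop with the 'number_found' flag
def check_cols_rowscan (board : List (List Bool)) (col_index : Int) : Bool :=
  (PySem.List.pyRange 0 (board.length : Int) 1).foldl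
    (fun number_found row_index =>
      if PySem.List.pyGetD (PySem.List.pyGetD board row_index []) col_index false ≠ true
      then true else number_found)
    false

-- outer 'for col_index in range(len(board))' loop with its early 'return True'
def check_cols_loop (board : List (List Bool)) : List Int → Bool
  | [] => false
  | col_index :: rest =>
    if !(check_cols_rowscan board col_index) then true
    else check_cols_loop board rest

def check_cols (board : List (List Bool)) : Bool :=
  check_cols_loop board (PySem.List.pyRange 0 (board.length : Int) 1)

-- ===== PORT B =====
def check_cols_alt (board : List (List Bool)) : Bool :=
  let n : Int := board.length
  let counts : List Int :=
    (PySem.List.pyRange 0 n 1).foldl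
      (fun counts row_index =>
        (PySem.List.pyRange 0 n 1).foldl
          (fun counts col_index =>
            if PySem.List.pyGetD (PySem.List.pyGetD board row_index []) col_index false = true
            then counts.set col_index.toNat (PySem.List.pyGetD counts col_index 0 + 1)
            else counts)
          counts)
      (List.replicate board.length (0 : Int))
  counts.any (fun c => c == n)

-- ===== PRECONDITION & SPEC =====
-- Pre_ excludes ragged boards (some row shorter than the number of rows): there Python A
-- raises IndexError, or returns True via its early exit before ever reading the short row,
-- while B's row-major pass raises IndexError; both are artefacts of traversal order.
def Pre_check_cols (board : List (List Bool)) : Prop :=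
  ∀ row ∈ board, board.length ≤ row.length
instance (board : List (List Bool)) : Decidable (Pre_check_cols board) := by
  unfold Pre_check_cols; infer_instance
def pvWitness_check_cols : List (List Bool) := [[true, false], [false, true]]
def Spec_check_cols (board : List (List Bool)) (out : Bool) : Prop := out = check_cols_alt board
instance (board : List (List Bool)) (out : Bool) : Decidable (Spec_check_cols board out) := by
  unfold Spec_check_cols; infer_instance

-- ===== CLAIM (what is proved, stated in full; the proofs are below) =====
def Claim_equal_check_cols : Prop := ∀ (board : List (List Bool)), Dom_check_cols board → Pre_check_cols board → Spec_check_cols board (check_cols board)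

-- ===== LEMMAS AND PROOFS =====

-- the board entry both ports read: board[r][c] with out-of-range defaults
def pvG (board : List (List Bool)) (r c : Int) : Bool :=
  PySem.List.pyGetD (PySem.List.pyGetD board r []) c false

theorem pv_rowscan_aux (board : List (List Bool)) (col : Int) (l : List Int) (acc : Bool) :
    l.foldl
      (fun number_found row_index =>
        if PySem.List.pyGetD (PySem.List.pyGetD board row_index []) col false ≠ true
        then true else number_found) acc
    = (acc || l.any (fun r => !(pvG board r col))) := by
  induction l generalizing acc with
  | nil => simp
  | cons r rest ih =>
    simp only [List.foldl_cons, List.any_cons, ih, pvG]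
    by_cases h : PySem.List.pyGetD (PySem.List.pyGetD board r []) col false = true <;>
      simp [h]

theorem pv_loop_eq (board : List (List Bool)) (cs : List Int) :
    check_cols_loop board cs = cs.any (fun c => !(check_cols_rowscan board c)) := by
  induction cs with
  | nil => rfl
  | cons c rest ih =>
    simp only [check_cols_loop, ih, List.any_cons]
    by_cases h : check_cols_rowscan board c <;> simp [h]

theorem pv_A_eq (board : List (List Bool)) :
    check_cols board
      = (PySem.List.pyRange 0 (board.length : Int) 1).any
          (fun c => (PySem.List.pyRange 0 (board.length : Int) 1).all
            (fun r => pvG board r c)) := by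
  rw [check_cols, pv_loop_eq]
  congr 1
  funext c
  rw [check_cols_rowscan, pv_rowscan_aux]
  simp [List.all_eq_not_any_not]

-- one step of B's inner loop
def pvStep (board : List (List Bool)) (row : Int) (counts : List Int) (col : Int) : List Int :=
  if PySem.List.pyGetD (PySem.List.pyGetD board row []) col false = true
  then counts.set col.toNat (PySem.List.pyGetD counts col 0 + 1)
  else counts

theorem pv_step_length (board : List (List Bool)) (row : Int) (counts : List Int) (col : Int) :
    (pvStep board row counts col).length = counts.length := by
  unfold pvStep; split <;> simp

theorem pv_inner_length (board : List (List Bool)) (row : Int) (cs : List Int)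
    (counts : List Int) :
    (cs.foldl (pvStep board row) counts).length = counts.length := by
  induction cs generalizing counts with
  | nil => rfl
  | cons c rest ih => rw [List.foldl_cons, ih, pv_step_length]

theorem pv_inner_getD (board : List (List Bool)) (row : Int) (cs : List Int)
    (counts : List Int) (h : ∀ c ∈ cs, 0 ≤ c ∧ c < (counts.length : Int)) (j : Nat) :
    (cs.foldl (pvStep board row) counts).getD j 0
      = counts.getD j 0
        + (cs.countP (fun c => decide (c = (j : Int)) && pvG board row c) : Int) := by
  induction cs generalizing counts with
  | nil => simp
  | cons c rest ih =>
    obtain ⟨hc0, hclen⟩ := h c (by simp)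
    rw [List.foldl_cons, List.countP_cons]
    have hrest : ∀ c' ∈ rest, 0 ≤ c' ∧ c' < ((pvStep board row counts c).length : Int) := by
      rw [pv_step_length]; exact fun c' hc' => h c' (by simp [hc'])
    rw [ih _ hrest]
    have hset : (pvStep board row counts c).getD j 0
        = counts.getD j 0 + (if decide (c = (j : Int)) && pvG board row c then 1 else 0) := by
      unfold pvStep pvG
      by_cases hg : PySem.List.pyGetD (PySem.List.pyGetD board row []) c false = true
      · simp only [hg, if_true, Bool.and_true]
        by_cases hj : c = (j : Int)
        · subst hj
          simp only [decide_true, if_true, Int.toNat_natCast]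
          rw [List.getD_eq_getElem?_getD, List.getElem?_set_self (by omega),
            PySem.List.pyGetD_of_nonneg]
          · simp [List.getD_eq_getElem?_getD]
          · omega
        · have hjn : c.toNat ≠ j := by omega
          simp only [hj, decide_false]
          rw [List.getD_eq_getElem?_getD, List.getElem?_set_ne hjn,
            ← List.getD_eq_getElem?_getD]
          simp
      · simp [hg]
    rw [hset]
    push_cast
    ring
-- countP over range(n) of a predicate that pins c = j: only the single element j counts
theorem pv_count_single (n j : Nat) (hj : j < n) (p : Int → Bool) :
    (PySem.List.pyRange 0 (n : Int) 1).countP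
        (fun c => decide (c = (j : Int)) && p c)
      = if p (j : Int) then 1 else 0 := by
  have hsplit : PySem.List.pyRange 0 (n : Int) 1
      = PySem.List.pyRange 0 (j : Int) 1 ++ PySem.List.pyRange (j : Int) (n : Int) 1 :=
    PySem.List.pyRange_one_append _ _ _ (by omega) (by omega)
  have hcons : PySem.List.pyRange (j : Int) (n : Int) 1
      = (j : Int) :: PySem.List.pyRange ((j : Int) + 1) (n : Int) 1 :=
    PySem.List.pyRange_one_cons (by omega)
  rw [hsplit, List.countP_append, hcons, List.countP_cons]
  have h1 : (PySem.List.pyRange 0 (j : Int) 1).countP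
      (fun c => decide (c = (j : Int)) && p c) = 0 := by
    rw [List.countP_eq_zero]
    intro c hc
    have := (PySem.List.mem_pyRange_one).1 hc
    simp only [Bool.and_eq_true, decide_eq_true_eq]
    rintro ⟨rfl, -⟩; omega
  have h2 : (PySem.List.pyRange ((j : Int) + 1) (n : Int) 1).countP
      (fun c => decide (c = (j : Int)) && p c) = 0 := by
    rw [List.countP_eq_zero]
    intro c hc
    have := (PySem.List.mem_pyRange_one).1 hc
    simp only [Bool.and_eq_true, decide_eq_true_eq]
    rintro ⟨rfl, -⟩; omega
  rw [h1, h2]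
  by_cases hp : p (j : Int) <;> simp [hp]

theorem pv_outer (board : List (List Bool)) (rs : List Int) (counts : List Int)
    (hlen : counts.length = board.length) (j : Nat) (hj : j < board.length) :
    ((rs.foldl
        (fun counts row =>
          (PySem.List.pyRange 0 (board.length : Int) 1).foldl (pvStep board row) counts)
        counts).getD j 0
      = counts.getD j 0 + (rs.countP (fun r => pvG board r (j : Int)) : Int))
    ∧ (rs.foldl
        (fun counts row =>
          (PySem.List.pyRange 0 (board.length : Int) 1).foldl (pvStep board row) counts)
        counts).length = board.length := by
  induction rs generalizing counts with
  | nil => simpa using hlen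
  | cons r rest ih =>
    rw [List.foldl_cons]
    have hbound : ∀ c ∈ PySem.List.pyRange 0 (board.length : Int) 1,
        0 ≤ c ∧ c < (counts.length : Int) := by
      intro c hc
      have := (PySem.List.mem_pyRange_one).1 hc
      omega
    have hlen' : ((PySem.List.pyRange 0 (board.length : Int) 1).foldl
        (pvStep board r) counts).length = board.length := by
      rw [pv_inner_length]; exact hlen
    obtain ⟨ihg, ihl⟩ := ih _ hlen'
    refine ⟨?_, ihl⟩
    rw [ihg, pv_inner_getD board r _ counts hbound j,
      pv_count_single board.length j hj (fun c => pvG board r c), List.countP_cons]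
    push_cast
    by_cases hp : pvG board r (j : Int) <;> simp [hp] <;> ring

def pvOuter (board : List (List Bool)) : List Int :=
  (PySem.List.pyRange 0 (board.length : Int) 1).foldl
    (fun counts row =>
      (PySem.List.pyRange 0 (board.length : Int) 1).foldl (pvStep board row) counts)
    (List.replicate board.length (0 : Int))

theorem pv_B_unfold (board : List (List Bool)) :
    check_cols_alt board = (pvOuter board).any (fun c => c == (board.length : Int)) := rfl

theorem pv_B_eq (board : List (List Bool)) :
    check_cols_alt board
      = decide (∃ j : Nat, j < board.length ∧
          ((PySem.List.pyRange 0 (board.length : Int) 1).countP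
            (fun r => pvG board r (j : Int)) : Int) = (board.length : Int)) := by
  rw [pv_B_unfold]
  have key : ∀ j : Nat, j < board.length →
      (pvOuter board).getD j 0
        = ((PySem.List.pyRange 0 (board.length : Int) 1).countP
            (fun r => pvG board r (j : Int)) : Int) := by
    intro j hj
    unfold pvOuter
    rw [(pv_outer board (PySem.List.pyRange 0 (board.length : Int) 1)
      (List.replicate board.length (0 : Int)) (by simp) j hj).1]
    simp
  have klen : (pvOuter board).length = board.length := by
    rcases Nat.eq_zero_or_pos board.length with hz | hpos
    · unfold pvOuter
      rw [hz]
      rw [show PySem.List.pyRange 0 ((0 : Nat) : Int) 1 = [] from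
        PySem.List.pyRange_one_eq_nil (by omega)]
      rfl
    · exact (pv_outer board (PySem.List.pyRange 0 (board.length : Int) 1)
        (List.replicate board.length (0 : Int)) (by simp) 0 hpos).2
  rw [Bool.eq_iff_iff]
  simp only [List.any_eq_true, beq_iff_eq, decide_eq_true_eq]
  constructor
  · rintro ⟨x, hx, hxe⟩
    obtain ⟨j, hjlen, hjx⟩ := List.mem_iff_getElem.1 hx
    have hjn : j < board.length := klen ▸ hjlen
    refine ⟨j, hjn, ?_⟩
    rw [← key j hjn, List.getD_eq_getElem?_getD, List.getElem?_eq_getElem hjlen]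
    simpa using hjx ▸ hxe
  · rintro ⟨j, hj, hje⟩
    refine ⟨(pvOuter board).getD j 0, ?_, by rw [key j hj]; exact hje⟩
    rw [List.getD_eq_getElem?_getD, List.getElem?_eq_getElem (by omega)]
    exact List.getElem_mem _

theorem pv_main (board : List (List Bool)) :
    check_cols board = check_cols_alt board := by
  rw [pv_A_eq, pv_B_eq]
  have hlenR : (PySem.List.pyRange 0 (board.length : Int) 1).length = board.length := by
    rw [PySem.List.length_pyRange_one]; omega
  rw [Bool.eq_iff_iff]
  simp only [List.any_eq_true, List.all_eq_true, decide_eq_true_eq]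
  constructor
  · rintro ⟨c, hc, hall⟩
    have hcr := (PySem.List.mem_pyRange_one).1 hc
    refine ⟨c.toNat, by omega, ?_⟩
    have hc' : ((c.toNat : Nat) : Int) = c := by omega
    rw [hc', List.countP_eq_length.mpr hall, hlenR]
  · rintro ⟨j, hj, hje⟩
    refine ⟨(j : Int), (PySem.List.mem_pyRange_one).2 (by omega), fun r hr => ?_⟩
    have hcnt : (PySem.List.pyRange 0 (board.length : Int) 1).countP
        (fun r => pvG board r (j : Int))
        = (PySem.List.pyRange 0 (board.length : Int) 1).length := by
      rw [hlenR]; omega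
    exact List.countP_eq_length.1 hcnt r hr

-- ===== VERDICT (by name: the statement is the Claim_ definition above) =====
theorem check_cols_spec : Claim_equal_check_cols := by
  intro board _hdom _hpre
  unfold Spec_check_cols
  exact pv_main board
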